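-- pv_equiv track=rewrite | github.com/mnmsgit/ProblemSolving | 프로그래머스/3/388354. 홀짝트리/홀짝트리.py | solution
-- ===== SOURCE A (Python) =====
-- from collections import deque
--
-- def solution(nodes, edges):
--     answer = [0, 0]
--     # 그래프 생성 (양방향)
--     graph = {node: [] for node in nodes}
--     for a, b in edges:
--         graph[a].append(b)
--         graph[b].append(a)
--
--     # 연결 컴포넌트를 구한다. (한 번 계산한 결과를 재활용)
--     visited = set()
--     components = []  # 각 컴포넌트는 노드 리스트로 저장
--     for node in nodes:
--         if node not in visited:
--             comp = []
--             queue = deque([node])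
--             visited.add(node)
--             while queue:
--                 cur = queue.popleft()
--                 comp.append(cur)
--                 for nxt in graph[cur]:
--                     if nxt not in visited:
--                         visited.add(nxt)
--                         queue.append(nxt)
--             components.append(comp)
--
--     # 각 컴포넌트별로 홀짝트리 / 역홀짝트리 후보의 수를 계산한다.
--     for comp in components:
--         # 미리 각 노드의 차수(연결된 간선 수)를 구함
--         degrees = {node: len(graph[node]) for node in comp}
--
--         # [홀짝트리]
--         # - 루트 노드: 조건은 (deg(root) % 2 == root % 2)
--         # - 비루트 노드: 조건은 ((deg(node)-1) % 2 == node % 2)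
--         # 만약 비루트 조건을 위배하는 노드가 0개라면, 루트 조건만 맞는 노드가 후보
--         # 만약 위배하는 노드가 1개라면, 오직 그 노드만 루트로 선택해야 전체 조건을 만족
--         # 위배하는 노드가 2개 이상이면 어떤 루트를 선택해도 조건을 만족시킬 수 없다.
--         bad_oetree = [v for v in comp if (degrees[v] - 1) % 2 != (v % 2)]
--         if len(bad_oetree) == 0:
--             count_oetree = sum(1 for v in comp if degrees[v] % 2 == (v % 2))
--         elif len(bad_oetree) == 1:
--             candidate = bad_oetree[0]
--             count_oetree = 1 if degrees[candidate] % 2 == (candidate % 2) else 0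
--         else:
--             count_oetree = 0
--         answer[0] += count_oetree
--
--         # [역홀짝트리]
--         # - 루트 노드: 조건은 (deg(root) % 2 != root % 2)
--         # - 비루트 노드: 조건은 ((deg(node)-1) % 2 != node % 2)
--         bad_rev = [v for v in comp if (degrees[v] - 1) % 2 == (v % 2)]
--         if len(bad_rev) == 0:
--             count_rev = sum(1 for v in comp if degrees[v] % 2 != (v % 2))
--         elif len(bad_rev) == 1:
--             candidate = bad_rev[0]
--             count_rev = 1 if degrees[candidate] % 2 != (candidate % 2) else 0
--         else:
--             count_rev = 0
--         answer[1] += count_rev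
--
--     return answer
-- ===== SOURCE B (Python) =====
-- def solution(nodes, edges):
--     # Single pass: per component it suffices to know how many nodes satisfy
--     # deg(v) % 2 == v % 2 (call them "ones"): a component contributes 1 to
--     # answer[0] iff it has exactly one such node, and 1 to answer[1] iff it
--     # has exactly one node violating it. DFS with an explicit stack.
--     adj = {v: [] for v in nodes}
--     deg = {v: 0 for v in nodes}
--     for a, b in edges:
--         adj[a].append(b)
--         adj[b].append(a)
--         deg[a] += 1
--         deg[b] += 1
--     seen = set()
--     oe = rev = 0
--     for s in nodes:
--         if s in seen:
--             continue
--         seen.add(s)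
--         stack = [s]
--         ones = size = 0
--         while stack:
--             v = stack.pop()
--             size += 1
--             if deg[v] % 2 == v % 2:
--                 ones += 1
--             for w in adj[v]:
--                 if w not in seen:
--                     seen.add(w)
--                     stack.append(w)
--         if ones == 1:
--             oe += 1
--         if size - ones == 1:
--             rev += 1
--     return [oe, rev]
-- ===== Notes on version B (the rewrite author's own statement) =====
-- stated objective: simpler
-- what changed: B replaces A's three-phase BFS-components + per-component degree dicts + bad-list 0/1/2 branching by a single-pass stack DFS that only counts, per component, the nodes with deg%2==v%2 and the component size, using the identity that A's per-component contribution is 1 exactly when that count (resp. size minus that count) equals 1; degrees are accumulated per edge instead of via adjacency-list lengths.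
import Mathlib
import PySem

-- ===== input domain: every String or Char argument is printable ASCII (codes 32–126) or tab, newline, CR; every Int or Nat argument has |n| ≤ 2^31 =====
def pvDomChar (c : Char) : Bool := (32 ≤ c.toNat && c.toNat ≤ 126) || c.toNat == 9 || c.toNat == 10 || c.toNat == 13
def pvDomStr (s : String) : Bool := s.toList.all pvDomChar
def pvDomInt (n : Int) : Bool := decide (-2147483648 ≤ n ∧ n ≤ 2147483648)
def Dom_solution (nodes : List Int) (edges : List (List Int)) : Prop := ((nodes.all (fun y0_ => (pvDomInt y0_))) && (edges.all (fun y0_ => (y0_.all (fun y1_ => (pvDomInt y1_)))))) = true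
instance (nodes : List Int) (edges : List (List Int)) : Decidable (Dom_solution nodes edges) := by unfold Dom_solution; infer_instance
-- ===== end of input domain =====

-- B replaces A's BFS-components + per-component degree dicts + bad-list 0/1/≥2 branching by a
-- single-pass stack DFS that counts, per component, the nodes with deg%2==v%2 and the size.


-- ===== PORT A =====
-- BFS inner loop (`while queue:` with popleft). The fuel argument only makes the recursion
-- structural; under Pre_ every enqueued node is a fresh element of `nodes`, so a fuel of
-- nodes.length + 1 is never exhausted (proved in the lemmas below).
def bfsLoopA (graph : PySem.Dict Int (List Int)) :
    Nat → PySem.Set Int → List Int → List Int → (PySem.Set Int × List Int)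
  | 0, visited, _, comp => (visited, comp)
  | fuel+1, visited, queue, comp =>
    match queue with
    | [] => (visited, comp)
    | cur :: rest =>
      let vq := (graph.getD cur []).foldl
        (fun (vq : PySem.Set Int × List Int) nxt =>
          if nxt ∈ vq.1 then vq else (PySem.Set.add vq.1 nxt, vq.2 ++ [nxt])) (visited, rest)
      bfsLoopA graph fuel vq.1 vq.2 (comp ++ [cur])

def solution (nodes : List Int) (edges : List (List Int)) : List Int :=
  -- graph = {node: [] for node in nodes}
  let graph := nodes.foldl (fun (g : PySem.Dict Int (List Int)) v => g.insert v []) PySem.Dict.empty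
  -- for a, b in edges: graph[a].append(b); graph[b].append(a)
  -- (Pre_: e is a pair of keys of graph, so unpacking and the KeyError lookups succeed)
  let graph := edges.foldl (fun g e =>
      let a := (PySem.List.pyGet? e 0).getD 0
      let b := (PySem.List.pyGet? e 1).getD 0
      let g := g.modify a [] (fun l => l ++ [b])
      g.modify b [] (fun l => l ++ [a])) graph
  -- connected components by BFS over unvisited seeds
  let st := nodes.foldl (fun (st : PySem.Set Int × List (List Int)) node =>
      if node ∈ st.1 then st
      else
        let r := bfsLoopA graph (nodes.length + 1) (PySem.Set.add st.1 node) [node] []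
        (r.1, st.2 ++ [r.2])) (PySem.Set.empty, [])
  let components := st.2
  -- per-component counting with a degrees dict and the bad lists
  let answer := components.foldl (fun (ans : Int × Int) comp =>
      let degrees := comp.foldl (fun (d : PySem.Dict Int Int) v =>
          d.insert v ((graph.getD v []).length : Int)) PySem.Dict.empty
      let bad_oe := comp.filter (fun v =>
          decide (PySem.Int.mod (degrees.getD v 0 - 1) 2 ≠ PySem.Int.mod v 2))
      let count_oe : Int :=
        if bad_oe.length = 0 then
          comp.foldl (fun s v => if PySem.Int.mod (degrees.getD v 0) 2 = PySem.Int.mod v 2 then s + 1 else s) 0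
        else if bad_oe.length = 1 then
          let candidate := (PySem.List.pyGet? bad_oe 0).getD 0
          if PySem.Int.mod (degrees.getD candidate 0) 2 = PySem.Int.mod candidate 2 then 1 else 0
        else 0
      let bad_rev := comp.filter (fun v =>
          decide (PySem.Int.mod (degrees.getD v 0 - 1) 2 = PySem.Int.mod v 2))
      let count_rev : Int :=
        if bad_rev.length = 0 then
          comp.foldl (fun s v => if PySem.Int.mod (degrees.getD v 0) 2 ≠ PySem.Int.mod v 2 then s + 1 else s) 0
        else if bad_rev.length = 1 then
          let candidate := (PySem.List.pyGet? bad_rev 0).getD 0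
          if PySem.Int.mod (degrees.getD candidate 0) 2 ≠ PySem.Int.mod candidate 2 then 1 else 0
        else 0
      (ans.1 + count_oe, ans.2 + count_rev)) ((0 : Int), (0 : Int))
  [answer.1, answer.2]

-- ===== PORT B =====
-- DFS inner loop (`while stack:` with pop from the end), counting inline. Same fuel remark.
def dfsLoopB (adj : PySem.Dict Int (List Int)) (deg : PySem.Dict Int Int) :
    Nat → PySem.Set Int → List Int → Int → Int → (PySem.Set Int × Int × Int)
  | 0, seen, _, ones, size => (seen, ones, size)
  | fuel+1, seen, stack, ones, size =>
    if h : stack = [] then (seen, ones, size)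
    else
      let v := stack.getLast h
      let rest := stack.dropLast
      let size' := size + 1
      let ones' := if PySem.Int.mod (deg.getD v 0) 2 = PySem.Int.mod v 2 then ones + 1 else ones
      let sr := (adj.getD v []).foldl
        (fun (sr : PySem.Set Int × List Int) w =>
          if w ∈ sr.1 then sr else (PySem.Set.add sr.1 w, sr.2 ++ [w])) (seen, rest)
      dfsLoopB adj deg fuel sr.1 sr.2 ones' size'

def solution_alt (nodes : List Int) (edges : List (List Int)) : List Int :=
  let adj0 := nodes.foldl (fun (g : PySem.Dict Int (List Int)) v => g.insert v []) PySem.Dict.empty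
  let deg0 := nodes.foldl (fun (d : PySem.Dict Int Int) v => d.insert v 0) PySem.Dict.empty
  -- one edge loop filling adjacency and degree together (Pre_: endpoints are keys)
  let ad := edges.foldl (fun (ad : PySem.Dict Int (List Int) × PySem.Dict Int Int) e =>
      let a := (PySem.List.pyGet? e 0).getD 0
      let b := (PySem.List.pyGet? e 1).getD 0
      ((ad.1.modify a [] (fun l => l ++ [b])).modify b [] (fun l => l ++ [a]),
       (ad.2.modify a 0 (fun n => n + 1)).modify b 0 (fun n => n + 1))) (adj0, deg0)
  -- one pass: per unvisited seed run a DFS counting `ones` and `size`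
  let st := nodes.foldl (fun (st : PySem.Set Int × Int × Int) s =>
      if s ∈ st.1 then st
      else
        let r := dfsLoopB ad.1 ad.2 (nodes.length + 1) (PySem.Set.add st.1 s) [s] 0 0
        (r.1, st.2.1 + (if r.2.1 = 1 then (1:Int) else 0), st.2.2 + (if r.2.2 - r.2.1 = 1 then (1:Int) else 0)))
      (PySem.Set.empty, (0 : Int), (0 : Int))
  [st.2.1, st.2.2]

-- ===== PRECONDITION & SPEC =====
-- Pre_ excludes exactly the raising inputs: an edge that is not a 2-element list (ValueError on
-- unpacking) or whose endpoint is not in nodes (KeyError); A raises there, and so does B.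
def Pre_solution (nodes : List Int) (edges : List (List Int)) : Prop :=
  ∀ e ∈ edges, e.length = 2 ∧ ∀ x ∈ e, x ∈ nodes
instance (nodes : List Int) (edges : List (List Int)) : Decidable (Pre_solution nodes edges) := by
  unfold Pre_solution; infer_instance
def pvWitness_solution : List Int × List (List Int) := ([1, 2, 4], [[1, 2]])
def Spec_solution (nodes : List Int) (edges : List (List Int)) (out : List Int) : Prop := out = solution_alt nodes edges
instance (nodes : List Int) (edges : List (List Int)) (out : List Int) : Decidable (Spec_solution nodes edges out) := by unfold Spec_solution; infer_instance

-- ===== CLAIM (what is proved, stated in full; the proofs are below) =====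
def Claim_equal_solution : Prop := ∀ (nodes : List Int) (edges : List (List Int)), Dom_solution nodes edges → Pre_solution nodes edges → Spec_solution nodes edges (solution nodes edges)

-- ===== LEMMAS AND PROOFS =====
-- predicate "root-ok" for the odd-even tree: deg(v) % 2 == v % 2
def pvP (graph : PySem.Dict Int (List Int)) (v : Int) : Bool :=
  decide (PySem.Int.mod ((graph.getD v []).length : Int) 2 = PySem.Int.mod v 2)

def pvOE (graph : PySem.Dict Int (List Int)) (comp : List Int) : Int :=
  if comp.countP (pvP graph) = 1 then 1 else 0

def pvREV (graph : PySem.Dict Int (List Int)) (comp : List Int) : Int :=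
  if comp.countP (fun v => !pvP graph v) = 1 then 1 else 0

lemma pv_modArith (d v : Int) :
    (PySem.Int.mod (d - 1) 2 ≠ PySem.Int.mod v 2) ↔ PySem.Int.mod d 2 = PySem.Int.mod v 2 := by
  rw [PySem.Int.mod_eq_emod_of_pos (by omega), PySem.Int.mod_eq_emod_of_pos (a := d) (by omega),
    PySem.Int.mod_eq_emod_of_pos (a := v) (by omega)]
  omega

lemma pv_getD_fold_insert_not_mem (f : Int → Int) (comp : List Int) :
    ∀ (d : PySem.Dict Int Int) (v : Int), v ∉ comp →
      (comp.foldl (fun d v => d.insert v (f v)) d).getD v 0 = d.getD v 0 := by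
  induction comp with
  | nil => intro d v _; rfl
  | cons c t ih =>
    intro d v hv
    simp only [List.mem_cons, not_or] at hv
    simp only [List.foldl_cons]
    rw [ih _ _ hv.2, PySem.Dict.getD_insert]
    simp [hv.1]

lemma pv_getD_fold_insert_mem (f : Int → Int) (comp : List Int) :
    ∀ (d : PySem.Dict Int Int) (v : Int), v ∈ comp →
      (comp.foldl (fun d v => d.insert v (f v)) d).getD v 0 = f v := by
  induction comp with
  | nil => intro d v hv; simp at hv
  | cons c t ih =>
    intro d v hv
    simp only [List.foldl_cons]
    by_cases ht : v ∈ t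
    · exact ih _ _ ht
    · have hvc : v = c := by rcases List.mem_cons.mp hv with h | h; exact h; exact absurd h ht
      subst hvc
      rw [pv_getD_fold_insert_not_mem f t _ _ ht, PySem.Dict.getD_insert]
      simp
lemma pv_modArith' (d v : Int) :
    (PySem.Int.mod (d - 1) 2 = PySem.Int.mod v 2) ↔ ¬ (PySem.Int.mod d 2 = PySem.Int.mod v 2) := by
  rw [PySem.Int.mod_eq_emod_of_pos (by omega), PySem.Int.mod_eq_emod_of_pos (a := d) (by omega),
    PySem.Int.mod_eq_emod_of_pos (a := v) (by omega)]
  omega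

-- the whole per-component body of A's second loop computes (ans.1 + pvOE, ans.2 + pvREV)
lemma pv_contrib (graph : PySem.Dict Int (List Int)) :
    (fun (ans : Int × Int) (comp : List Int) =>
      let degrees := comp.foldl (fun (d : PySem.Dict Int Int) v =>
          d.insert v ((graph.getD v []).length : Int)) PySem.Dict.empty
      let bad_oe := comp.filter (fun v =>
          decide (PySem.Int.mod (degrees.getD v 0 - 1) 2 ≠ PySem.Int.mod v 2))
      let count_oe : Int :=
        if bad_oe.length = 0 then
          comp.foldl (fun s v => if PySem.Int.mod (degrees.getD v 0) 2 = PySem.Int.mod v 2 then s + 1 else s) 0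
        else if bad_oe.length = 1 then
          let candidate := (PySem.List.pyGet? bad_oe 0).getD 0
          if PySem.Int.mod (degrees.getD candidate 0) 2 = PySem.Int.mod candidate 2 then 1 else 0
        else 0
      let bad_rev := comp.filter (fun v =>
          decide (PySem.Int.mod (degrees.getD v 0 - 1) 2 = PySem.Int.mod v 2))
      let count_rev : Int :=
        if bad_rev.length = 0 then
          comp.foldl (fun s v => if PySem.Int.mod (degrees.getD v 0) 2 ≠ PySem.Int.mod v 2 then s + 1 else s) 0
        else if bad_rev.length = 1 then
          let candidate := (PySem.List.pyGet? bad_rev 0).getD 0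
          if PySem.Int.mod (degrees.getD candidate 0) 2 ≠ PySem.Int.mod candidate 2 then 1 else 0
        else 0
      ((ans.1 + count_oe, ans.2 + count_rev) : Int × Int))
    = (fun ans comp => (ans.1 + pvOE graph comp, ans.2 + pvREV graph comp)) := by
  funext ans comp
  simp only []
  have hdeg : ∀ v ∈ comp, (comp.foldl (fun (d : PySem.Dict Int Int) v =>
      d.insert v ((graph.getD v []).length : Int)) PySem.Dict.empty).getD v 0
      = ((graph.getD v []).length : Int) :=
    fun v hv => pv_getD_fold_insert_mem _ comp _ v hv
  have hfil_oe : comp.filter (fun v =>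
      decide (PySem.Int.mod ((comp.foldl (fun (d : PySem.Dict Int Int) v =>
          d.insert v ((graph.getD v []).length : Int)) PySem.Dict.empty).getD v 0 - 1) 2
        ≠ PySem.Int.mod v 2)) = comp.filter (pvP graph) := by
    apply List.filter_congr
    intro x hx
    apply decide_eq_decide.mpr
    rw [hdeg x hx]
    exact pv_modArith _ _
  have hfil_rev : comp.filter (fun v =>
      decide (PySem.Int.mod ((comp.foldl (fun (d : PySem.Dict Int Int) v =>
          d.insert v ((graph.getD v []).length : Int)) PySem.Dict.empty).getD v 0 - 1) 2
        = PySem.Int.mod v 2)) = comp.filter (fun v => !pvP graph v) := by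
    apply List.filter_congr
    intro x hx
    rw [Bool.eq_iff_iff]
    rw [hdeg x hx]
    simp only [decide_eq_true_eq, Bool.not_eq_eq_eq_not, Bool.not_true, pvP,
      decide_eq_false_iff_not]
    exact pv_modArith' _ _
  rw [hfil_oe, hfil_rev]
  have hsum_oe : comp.foldl (fun (s : Int) v =>
      if PySem.Int.mod ((comp.foldl (fun (d : PySem.Dict Int Int) v =>
          d.insert v ((graph.getD v []).length : Int)) PySem.Dict.empty).getD v 0) 2
        = PySem.Int.mod v 2 then s + 1 else s) 0 = (comp.countP (pvP graph) : Int) := by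
    rw [PySem.List.foldl_congr_mem _ _ (fun s v => if pvP graph v then s + 1 else s) 0 ?_]
    · rw [show (fun (s : Int) v => if pvP graph v then s + 1 else s)
          = (fun (s : Int) v => if pvP graph v = true then s + 1 else s) by simp]
      rw [PySem.List.foldl_count_if (pvP graph) comp 0]
      simp
    · intro acc x hx
      rw [hdeg x hx]
      simp [pvP]
  have hsum_rev : comp.foldl (fun (s : Int) v =>
      if PySem.Int.mod ((comp.foldl (fun (d : PySem.Dict Int Int) v =>
          d.insert v ((graph.getD v []).length : Int)) PySem.Dict.empty).getD v 0) 2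
        ≠ PySem.Int.mod v 2 then s + 1 else s) 0 = (comp.countP (fun v => !pvP graph v) : Int) := by
    rw [PySem.List.foldl_congr_mem _ _ (fun s v => if !pvP graph v then s + 1 else s) 0 ?_]
    · rw [show (fun (s : Int) v => if !pvP graph v then s + 1 else s)
          = (fun (s : Int) v => if (!pvP graph v) = true then s + 1 else s) by simp]
      rw [PySem.List.foldl_count_if _ comp 0]
      simp
    · intro acc x hx
      rw [hdeg x hx]
      simp [pvP]
  rw [hsum_oe, hsum_rev]
  have hX : (if (comp.filter (pvP graph)).length = 0 then (comp.countP (pvP graph) : Int)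
      else if (comp.filter (pvP graph)).length = 1 then
        (if PySem.Int.mod ((comp.foldl (fun (d : PySem.Dict Int Int) v =>
            d.insert v ((graph.getD v []).length : Int)) PySem.Dict.empty).getD
            ((PySem.List.pyGet? (comp.filter (pvP graph)) 0).getD 0) 0) 2
          = PySem.Int.mod ((PySem.List.pyGet? (comp.filter (pvP graph)) 0).getD 0) 2 then (1:Int) else 0)
      else 0) = pvOE graph comp := by
    by_cases h0 : (comp.filter (pvP graph)).length = 0
    · rw [if_pos h0, pvOE, List.countP_eq_length_filter, h0]
      simp
    · rw [if_neg h0]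
      by_cases h1 : (comp.filter (pvP graph)).length = 1
      · rw [if_pos h1]
        obtain ⟨w, hw⟩ := List.length_eq_one_iff.mp h1
        have hwmem : w ∈ comp.filter (pvP graph) := by rw [hw]; simp
        have hwc : w ∈ comp := (List.mem_filter.mp hwmem).1
        have hwp : pvP graph w = true := (List.mem_filter.mp hwmem).2
        rw [hw]
        have hcand : (PySem.List.pyGet? [w] (0:Int)).getD 0 = w := rfl
        rw [hcand, hdeg w hwc, if_pos (of_decide_eq_true hwp)]
        rw [pvOE, List.countP_eq_length_filter, h1]
        simp
      · rw [if_neg h1, pvOE, List.countP_eq_length_filter]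
        simp [h1]
  have hY : (if (comp.filter (fun v => !pvP graph v)).length = 0 then (comp.countP (fun v => !pvP graph v) : Int)
      else if (comp.filter (fun v => !pvP graph v)).length = 1 then
        (if PySem.Int.mod ((comp.foldl (fun (d : PySem.Dict Int Int) v =>
            d.insert v ((graph.getD v []).length : Int)) PySem.Dict.empty).getD
            ((PySem.List.pyGet? (comp.filter (fun v => !pvP graph v)) 0).getD 0) 0) 2
          ≠ PySem.Int.mod ((PySem.List.pyGet? (comp.filter (fun v => !pvP graph v)) 0).getD 0) 2 then (1:Int) else 0)
      else 0) = pvREV graph comp := by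
    by_cases h0 : (comp.filter (fun v => !pvP graph v)).length = 0
    · rw [if_pos h0, pvREV, List.countP_eq_length_filter, h0]
      simp
    · rw [if_neg h0]
      by_cases h1 : (comp.filter (fun v => !pvP graph v)).length = 1
      · rw [if_pos h1]
        obtain ⟨w, hw⟩ := List.length_eq_one_iff.mp h1
        have hwmem : w ∈ comp.filter (fun v => !pvP graph v) := by rw [hw]; simp
        have hwc : w ∈ comp := (List.mem_filter.mp hwmem).1
        have hwp : (!pvP graph w) = true := (List.mem_filter.mp hwmem).2
        rw [hw]
        have hcand : (PySem.List.pyGet? [w] (0:Int)).getD 0 = w := rfl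
        have hcond : PySem.Int.mod ((graph.getD w []).length : Int) 2 ≠ PySem.Int.mod w 2 := by
          simpa [pvP] using hwp
        rw [hcand, hdeg w hwc, if_pos hcond]
        rw [pvREV, List.countP_eq_length_filter, h1]
        simp
      · rw [if_neg h1, pvREV, List.countP_eq_length_filter]
        simp [h1]
  rw [hX, hY]

lemma pv_foldAns (graph : PySem.Dict Int (List Int)) (comps : List (List Int)) :
    ∀ acc : Int × Int,
      comps.foldl (fun ans comp => (ans.1 + pvOE graph comp, ans.2 + pvREV graph comp)) acc
        = (acc.1 + (comps.map (pvOE graph)).sum, acc.2 + (comps.map (pvREV graph)).sum) := by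
  induction comps with
  | nil => intro acc; simp
  | cons c t ih =>
    intro acc
    simp only [List.foldl_cons, List.map_cons, List.sum_cons, ih]
    simp [add_assoc]

lemma pv_adj_proj (edges : List (List Int)) :
    ∀ (g : PySem.Dict Int (List Int)) (d : PySem.Dict Int Int),
      (edges.foldl (fun (ad : PySem.Dict Int (List Int) × PySem.Dict Int Int) e =>
        let a := (PySem.List.pyGet? e 0).getD 0
        let b := (PySem.List.pyGet? e 1).getD 0
        ((ad.1.modify a [] (fun l => l ++ [b])).modify b [] (fun l => l ++ [a]),
         (ad.2.modify a 0 (fun n => n + 1)).modify b 0 (fun n => n + 1))) (g, d)).1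
      = edges.foldl (fun g e =>
        let a := (PySem.List.pyGet? e 0).getD 0
        let b := (PySem.List.pyGet? e 1).getD 0
        let g := g.modify a [] (fun l => l ++ [b])
        g.modify b [] (fun l => l ++ [a])) g := by
  induction edges with
  | nil => intros; rfl
  | cons e t ih => intros; simp only [List.foldl_cons]; exact ih _ _

lemma pv_deg_inv (edges : List (List Int)) :
    ∀ (g : PySem.Dict Int (List Int)) (d : PySem.Dict Int Int),
      (∀ v, d.getD v 0 = ((g.getD v []).length : Int)) →
      ∀ v, ((edges.foldl (fun (ad : PySem.Dict Int (List Int) × PySem.Dict Int Int) e =>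
        let a := (PySem.List.pyGet? e 0).getD 0
        let b := (PySem.List.pyGet? e 1).getD 0
        ((ad.1.modify a [] (fun l => l ++ [b])).modify b [] (fun l => l ++ [a]),
         (ad.2.modify a 0 (fun n => n + 1)).modify b 0 (fun n => n + 1))) (g, d)).2).getD v 0
        = (((edges.foldl (fun (ad : PySem.Dict Int (List Int) × PySem.Dict Int Int) e =>
        let a := (PySem.List.pyGet? e 0).getD 0
        let b := (PySem.List.pyGet? e 1).getD 0
        ((ad.1.modify a [] (fun l => l ++ [b])).modify b [] (fun l => l ++ [a]),
         (ad.2.modify a 0 (fun n => n + 1)).modify b 0 (fun n => n + 1))) (g, d)).1).getD v []).length := by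
  induction edges with
  | nil => intro g d h v; exact h v
  | cons e t ih =>
    intro g d h v
    simp only [List.foldl_cons]
    apply ih
    intro u
    simp only [PySem.Dict.getD_modify]
    split_ifs <;> (simp_all [List.length_append]; try omega)

lemma pv_init_adj (nodes : List Int) :
    ∀ (g : PySem.Dict Int (List Int)), (∀ v, g.getD v [] = []) →
      ∀ v, (nodes.foldl (fun (g : PySem.Dict Int (List Int)) v => g.insert v []) g).getD v [] = [] := by
  induction nodes with
  | nil => intro g h v; exact h v
  | cons c t ih =>
    intro g h v
    simp only [List.foldl_cons]
    apply ih
    intro u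
    rw [PySem.Dict.getD_insert]
    split_ifs
    · rfl
    · exact h u

lemma pv_init_deg (nodes : List Int) :
    ∀ (d : PySem.Dict Int Int), (∀ v, d.getD v 0 = 0) →
      ∀ v, (nodes.foldl (fun (d : PySem.Dict Int Int) v => d.insert v 0) d).getD v 0 = 0 := by
  induction nodes with
  | nil => intro d h v; exact h v
  | cons c t ih =>
    intro d h v
    simp only [List.foldl_cons]
    apply ih
    intro u
    rw [PySem.Dict.getD_insert]
    split_ifs
    · rfl
    · exact h u

lemma pv_len_two (e : List Int) (h : e.length = 2) : ∃ a b, e = [a, b] := by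
  match e, h with
  | [a, b], _ => exact ⟨a, b, rfl⟩

lemma pv_adj_mem (nodes : List Int) (edges : List (List Int)) :
    ∀ (g : PySem.Dict Int (List Int)),
      (∀ e ∈ edges, e.length = 2 ∧ ∀ x ∈ e, x ∈ nodes) →
      (∀ u w, w ∈ g.getD u [] → w ∈ nodes) →
      ∀ u w, w ∈ (edges.foldl (fun g e =>
        let a := (PySem.List.pyGet? e 0).getD 0
        let b := (PySem.List.pyGet? e 1).getD 0
        let g := g.modify a [] (fun l => l ++ [b])
        g.modify b [] (fun l => l ++ [a])) g).getD u [] → w ∈ nodes := by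
  induction edges with
  | nil => intro g _ hg; exact hg
  | cons e t ih =>
    intro g hpre hg
    simp only [List.foldl_cons]
    apply ih
    · intro e' he'; exact hpre e' (List.mem_cons_of_mem _ he')
    · have he := hpre e List.mem_cons_self
      obtain ⟨a, b, rfl⟩ := pv_len_two e he.1
      have ha : a ∈ nodes := he.2 a (by simp)
      have hb : b ∈ nodes := he.2 b (by simp)
      intro u w hw
      have e0 : (PySem.List.pyGet? [a, b] (0:Int)).getD 0 = a := rfl
      have e1 : (PySem.List.pyGet? [a, b] (1:Int)).getD 0 = b := rfl
      rw [e0, e1] at hw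
      simp only [PySem.Dict.getD_modify] at hw
      split_ifs at hw <;>
        (try simp only [List.mem_append, List.mem_singleton] at hw) <;>
        first
          | (rcases hw with (hw | rfl) | rfl
             · exact hg _ _ hw
             · exact hb
             · exact ha)
          | (rcases hw with hw | rfl
             · exact hg _ _ hw
             · first | exact ha | exact hb)
          | exact hg _ _ hw

-- reachability from s through nodes outside V0 (the visited set before this seed)
inductive pvReach (graph : PySem.Dict Int (List Int)) (V0 : List Int) (s : Int) : Int → Prop
  | base : s ∉ V0 → pvReach graph V0 s s
  | step {u w : Int} : pvReach graph V0 s u → w ∈ graph.getD u [] → w ∉ V0 → pvReach graph V0 s w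

lemma pvReach_not_mem {graph : PySem.Dict Int (List Int)} {V0 : List Int} {s v : Int}
    (h : pvReach graph V0 s v) : v ∉ V0 := by
  cases h with
  | base h => exact h
  | step _ _ h => exact h

lemma pvReach_congr {graph : PySem.Dict Int (List Int)} {V0 V0' : List Int}
    (hV : ∀ x, x ∈ V0 ↔ x ∈ V0') {s v : Int} :
    pvReach graph V0 s v → pvReach graph V0' s v := by
  intro h
  induction h with
  | base h => exact pvReach.base (fun hx => h ((hV s).mpr hx))
  | step _ hw hnot ih => exact pvReach.step ih hw (fun hx => hnot ((hV _).mpr hx))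

-- the neighbour loop `for nxt in …: if nxt not in visited: add + append`
lemma pv_nf_spec (ws : List Int) : ∀ (seen acc : List Int),
    ∃ new : List Int,
      ws.foldl (fun (sr : PySem.Set Int × List Int) w =>
          if w ∈ sr.1 then sr else (PySem.Set.add sr.1 w, sr.2 ++ [w])) (seen, acc)
        = (seen ++ new, acc ++ new) ∧
      new.Nodup ∧
      (∀ x ∈ new, x ∈ ws ∧ x ∉ seen) ∧
      (∀ x ∈ ws, x ∈ seen ++ new) := by
  induction ws with
  | nil => intro seen acc; exact ⟨[], by simp, by simp, by simp, by simp⟩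
  | cons w ws ih =>
    intro seen acc
    simp only [List.foldl_cons]
    by_cases hw : w ∈ seen
    · rw [if_pos hw]
      obtain ⟨new, h1, h2, h3, h4⟩ := ih seen acc
      refine ⟨new, h1, h2, fun x hx => ⟨List.mem_cons_of_mem _ (h3 x hx).1, (h3 x hx).2⟩, ?_⟩
      intro x hx
      rcases List.mem_cons.mp hx with rfl | hx
      · exact List.mem_append.mpr (Or.inl hw)
      · exact h4 x hx
    · rw [if_neg hw, show PySem.Set.add seen w = seen ++ [w] from by simp [PySem.Set.add, hw]]
      obtain ⟨new, h1, h2, h3, h4⟩ := ih (seen ++ [w]) (acc ++ [w])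
      refine ⟨w :: new, ?_, ?_, ?_, ?_⟩
      · rw [h1]; simp
      · refine List.Nodup.cons ?_ h2
        intro hmem
        exact (h3 w hmem).2 (by simp)
      · intro x hx
        rcases List.mem_cons.mp hx with rfl | hx
        · exact ⟨List.mem_cons_self, hw⟩
        · have := h3 x hx
          refine ⟨List.mem_cons_of_mem _ this.1, ?_⟩
          intro hxs
          exact this.2 (List.mem_append.mpr (Or.inl hxs))
      · intro x hx
        rcases List.mem_cons.mp hx with rfl | hx
        · simp
        · have := h4 x hx
          simp only [List.mem_append, List.mem_cons] at this ⊢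
          tauto

lemma pv_erase_len (l : List Int) (x : Int) (h1 : l.Nodup) (h2 : x ∈ l) :
    (l.filter (fun y => y ≠ x)).length + 1 = l.length := by
  have e := List.Nodup.erase_eq_filter (a := x) h1
  have h3 := List.length_erase_of_mem h2
  have hlen : 1 ≤ l.length := List.length_pos_of_mem h2
  rw [e] at h3
  have hfe : (fun (y : Int) => (y != x)) = (fun y => decide ¬ y = x) := by
    funext y; by_cases h : y = x <;> simp [h, bne]
  rw [hfe] at h3
  simp only [ne_eq]
  omega

lemma pv_len_step (univ : List Int) (hU : univ.Nodup) (seen : List Int) (y : Int)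
    (hyU : y ∈ univ) (hyS : y ∉ seen) :
    (univ.filter (fun x => decide (x ∉ seen ++ [y]))).length + 1
      = (univ.filter (fun x => decide (x ∉ seen))).length := by
  have hsplit : univ.filter (fun x => decide (x ∉ seen ++ [y]))
      = (univ.filter (fun x => decide (x ∉ seen))).filter (fun x => x ≠ y) := by
    rw [List.filter_filter]
    apply List.filter_congr
    intro x _
    simp only [List.mem_append, List.mem_singleton, not_or, ne_eq]
    by_cases h1 : x ∈ seen <;> by_cases h2 : x = y <;> simp [h1, h2]
  rw [hsplit]
  exact pv_erase_len _ y (List.Nodup.filter _ hU)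
    (List.mem_filter.mpr ⟨hyU, by simpa using hyS⟩)

lemma pv_filt_len (univ : List Int) (hU : univ.Nodup) :
    ∀ (new seen : List Int), new.Nodup → (∀ x ∈ new, x ∈ univ ∧ x ∉ seen) →
      (univ.filter (fun x => decide (x ∉ seen ++ new))).length + new.length
        = (univ.filter (fun x => decide (x ∉ seen))).length := by
  intro new
  induction new with
  | nil => intro seen _ _; simp
  | cons y new ih =>
    intro seen hnd hmem
    have hy := hmem y List.mem_cons_self
    have hre : (univ.filter (fun x => decide (x ∉ seen ++ y :: new)))
        = (univ.filter (fun x => decide (x ∉ (seen ++ [y]) ++ new))) := by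
      apply List.filter_congr
      intro x _
      apply decide_eq_decide.mpr
      simp only [List.mem_append, List.mem_cons, not_or]
      tauto
    rw [hre]
    have ihh := ih (seen ++ [y]) (List.Nodup.of_cons hnd)
      (fun x hx => ⟨(hmem x (List.mem_cons_of_mem _ hx)).1, by
        have h1 := (hmem x (List.mem_cons_of_mem _ hx)).2
        have h2 : x ≠ y := by
          intro rfl_; subst rfl_; exact (List.nodup_cons.mp hnd).1 hx
        simp [h1, h2]⟩)
    have hstep := pv_len_step univ hU seen y hy.1 hy.2
    simp only [List.length_cons]
    omega

lemma pv_bfs_spec (graph : PySem.Dict Int (List Int)) (V0 univ : List Int) (s : Int)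
    (hU : univ.Nodup) (hadj : ∀ u w, w ∈ graph.getD u [] → w ∈ univ) :
    ∀ (fuel : Nat) (visited queue comp base : List Int),
    (∀ q ∈ queue, pvReach graph V0 s q ∧ q ∈ visited) →
    (∀ v ∈ visited, v ∈ V0 ∨ pvReach graph V0 s v) →
    (∀ v ∈ V0, v ∈ visited) →
    visited.Nodup →
    (∀ v ∈ visited, v ∉ V0 → v ∈ queue ∨ ∀ w ∈ graph.getD v [], w ∈ visited) →
    queue.length + (univ.filter (fun x => decide (x ∉ visited))).length ≤ fuel →
    visited.Perm (base ++ comp ++ queue) →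
    (∀ v ∈ visited, v ∈ (bfsLoopA graph fuel visited queue comp).1) ∧
    (∀ v ∈ (bfsLoopA graph fuel visited queue comp).1, v ∈ V0 ∨ pvReach graph V0 s v) ∧
    (∀ v ∈ (bfsLoopA graph fuel visited queue comp).1, v ∉ V0 →
        ∀ w ∈ graph.getD v [], w ∈ (bfsLoopA graph fuel visited queue comp).1) ∧
    (bfsLoopA graph fuel visited queue comp).1.Nodup ∧
    (bfsLoopA graph fuel visited queue comp).1.Perm (base ++ (bfsLoopA graph fuel visited queue comp).2) := by
  intro fuel
  induction fuel with
  | zero =>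
    intro visited queue comp base H1 H2 H3 H4 H7 Hf HP
    have hq : queue = [] := List.eq_nil_of_length_eq_zero (by omega)
    subst hq
    simp only [bfsLoopA]
    refine ⟨fun v hv => hv, H2, ?_, H4, by simpa using HP⟩
    intro v hv hnv
    rcases H7 v hv hnv with h | h
    · simp at h
    · exact h
  | succ fuel ih =>
    intro visited queue comp base H1 H2 H3 H4 H7 Hf HP
    rcases queue with _ | ⟨cur, rest⟩
    · simp only [bfsLoopA]
      refine ⟨fun v hv => hv, H2, ?_, H4, by simpa using HP⟩
      intro v hv hnv
      rcases H7 v hv hnv with h | h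
      · simp at h
      · exact h
    · have hcur := H1 cur List.mem_cons_self
      obtain ⟨new, heq, hnd, hmem, hall⟩ := pv_nf_spec (graph.getD cur []) visited rest
      simp only [bfsLoopA, heq]
      have hnewmem : ∀ x ∈ new, pvReach graph V0 s x ∧ x ∉ visited ∧ x ∈ univ := by
        intro x hx
        have h1 := hmem x hx
        have hxnV0 : x ∉ V0 := fun hx0 => h1.2 (H3 x hx0)
        exact ⟨pvReach.step hcur.1 h1.1 hxnV0, h1.2, hadj cur x h1.1⟩
      have A1 : ∀ q ∈ rest ++ new, pvReach graph V0 s q ∧ q ∈ visited ++ new := by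
        intro q hq
        rcases List.mem_append.mp hq with hq | hq
        · exact ⟨(H1 q (List.mem_cons_of_mem _ hq)).1,
            List.mem_append.mpr (Or.inl (H1 q (List.mem_cons_of_mem _ hq)).2)⟩
        · exact ⟨(hnewmem q hq).1, List.mem_append.mpr (Or.inr hq)⟩
      have A2 : ∀ v ∈ visited ++ new, v ∈ V0 ∨ pvReach graph V0 s v := by
        intro v hv
        rcases List.mem_append.mp hv with hv | hv
        · exact H2 v hv
        · exact Or.inr (hnewmem v hv).1
      have A3 : ∀ v ∈ V0, v ∈ visited ++ new :=
        fun v hv => List.mem_append.mpr (Or.inl (H3 v hv))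
      have A4 : (visited ++ new).Nodup :=
        List.Nodup.append H4 hnd (fun x hx hx' => (hmem x hx').2 hx)
      have A7 : ∀ v ∈ visited ++ new, v ∉ V0 →
          v ∈ rest ++ new ∨ ∀ w ∈ graph.getD v [], w ∈ visited ++ new := by
        intro v hv hnv
        by_cases hvc : v = cur
        · subst hvc
          exact Or.inr (fun w hw => hall w hw)
        · rcases List.mem_append.mp hv with hv | hv
          · rcases H7 v hv hnv with h | h
            · rcases List.mem_cons.mp h with h | h
              · exact absurd h hvc
              · exact Or.inl (List.mem_append.mpr (Or.inl h))
            · exact Or.inr (fun w hw => List.mem_append.mpr (Or.inl (h w hw)))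
          · exact Or.inl (List.mem_append.mpr (Or.inr hv))
      have Afuel : (rest ++ new).length +
          (univ.filter (fun x => decide (x ∉ visited ++ new))).length ≤ fuel := by
        have hfl := pv_filt_len univ hU new visited hnd
          (fun x hx => ⟨(hnewmem x hx).2.2, (hnewmem x hx).2.1⟩)
        simp only [List.length_append, List.length_cons] at Hf ⊢
        omega
      have APerm : (visited ++ new).Perm (base ++ (comp ++ [cur]) ++ (rest ++ new)) := by
        have h1 : (visited ++ new).Perm ((base ++ comp ++ (cur :: rest)) ++ new) :=
          HP.append_right new
        have h2 : (base ++ comp ++ (cur :: rest)) ++ new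
            = base ++ (comp ++ [cur]) ++ (rest ++ new) := by
          simp [List.append_assoc]
        rw [h2] at h1
        exact h1
      obtain ⟨C1, C2, C3, C4, C5⟩ := ih (visited ++ new) (rest ++ new) (comp ++ [cur]) base
        A1 A2 A3 A4 A7 Afuel APerm
      exact ⟨fun v hv => C1 v (List.mem_append.mpr (Or.inl hv)), C2, C3, C4, C5⟩

-- predicate counted by B's DFS
def pvQ (deg : PySem.Dict Int Int) (v : Int) : Bool :=
  decide (PySem.Int.mod (deg.getD v 0) 2 = PySem.Int.mod v 2)

lemma pv_dfs_spec (graph : PySem.Dict Int (List Int)) (deg : PySem.Dict Int Int)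
    (V0 univ : List Int) (s : Int)
    (hU : univ.Nodup) (hadj : ∀ u w, w ∈ graph.getD u [] → w ∈ univ) :
    ∀ (fuel : Nat) (seen stack base proc0 : List Int) (ones size : Int),
    (∀ q ∈ stack, pvReach graph V0 s q ∧ q ∈ seen) →
    (∀ v ∈ seen, v ∈ V0 ∨ pvReach graph V0 s v) →
    (∀ v ∈ V0, v ∈ seen) →
    seen.Nodup →
    (∀ v ∈ seen, v ∉ V0 → v ∈ stack ∨ ∀ w ∈ graph.getD v [], w ∈ seen) →
    stack.length + (univ.filter (fun x => decide (x ∉ seen))).length ≤ fuel →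
    seen.Perm (base ++ proc0 ++ stack) →
    ones = (proc0.countP (pvQ deg) : Int) → size = (proc0.length : Int) →
    (∀ v ∈ seen, v ∈ (dfsLoopB graph deg fuel seen stack ones size).1) ∧
    (∀ v ∈ (dfsLoopB graph deg fuel seen stack ones size).1, v ∈ V0 ∨ pvReach graph V0 s v) ∧
    (∀ v ∈ (dfsLoopB graph deg fuel seen stack ones size).1, v ∉ V0 →
        ∀ w ∈ graph.getD v [], w ∈ (dfsLoopB graph deg fuel seen stack ones size).1) ∧
    (dfsLoopB graph deg fuel seen stack ones size).1.Nodup ∧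
    ∃ proc : List Int,
      (dfsLoopB graph deg fuel seen stack ones size).1.Perm (base ++ proc) ∧
      (dfsLoopB graph deg fuel seen stack ones size).2.1 = (proc.countP (pvQ deg) : Int) ∧
      (dfsLoopB graph deg fuel seen stack ones size).2.2 = (proc.length : Int) := by
  intro fuel
  induction fuel with
  | zero =>
    intro seen stack base proc0 ones size H1 H2 H3 H4 H7 Hf HP Ho Hs
    have hq : stack = [] := List.eq_nil_of_length_eq_zero (by omega)
    subst hq
    simp only [dfsLoopB]
    refine ⟨fun v hv => hv, H2, ?_, H4, ⟨proc0, by simpa using HP, Ho, Hs⟩⟩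
    intro v hv hnv
    rcases H7 v hv hnv with h | h
    · simp at h
    · exact h
  | succ fuel ih =>
    intro seen stack base proc0 ones size H1 H2 H3 H4 H7 Hf HP Ho Hs
    by_cases hnil : stack = []
    · subst hnil
      simp only [dfsLoopB, dif_pos]
      refine ⟨fun v hv => hv, H2, ?_, H4, ⟨proc0, by simpa using HP, Ho, Hs⟩⟩
      intro v hv hnv
      rcases H7 v hv hnv with h | h
      · simp at h
      · exact h
    · have hsplit : stack = stack.dropLast ++ [stack.getLast hnil] :=
        (List.dropLast_append_getLast hnil).symm
      set v0 := stack.getLast hnil with hv0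
      set rest := stack.dropLast with hrest
      have hv0mem : v0 ∈ stack := List.getLast_mem hnil
      have hcur := H1 v0 hv0mem
      obtain ⟨new, heq, hnd, hmem, hall⟩ := pv_nf_spec (graph.getD v0 []) seen rest
      simp only [dfsLoopB, dif_neg hnil]
      rw [← hv0, ← hrest, heq]
      have hnewmem : ∀ x ∈ new, pvReach graph V0 s x ∧ x ∉ seen ∧ x ∈ univ := by
        intro x hx
        have h1 := hmem x hx
        have hxnV0 : x ∉ V0 := fun hx0 => h1.2 (H3 x hx0)
        exact ⟨pvReach.step hcur.1 h1.1 hxnV0, h1.2, hadj v0 x h1.1⟩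
      have A1 : ∀ q ∈ rest ++ new, pvReach graph V0 s q ∧ q ∈ seen ++ new := by
        intro q hq
        rcases List.mem_append.mp hq with hq | hq
        · have hqs : q ∈ stack := by rw [hsplit]; exact List.mem_append.mpr (Or.inl hq)
          exact ⟨(H1 q hqs).1, List.mem_append.mpr (Or.inl (H1 q hqs).2)⟩
        · exact ⟨(hnewmem q hq).1, List.mem_append.mpr (Or.inr hq)⟩
      have A2 : ∀ v ∈ seen ++ new, v ∈ V0 ∨ pvReach graph V0 s v := by
        intro v hv
        rcases List.mem_append.mp hv with hv | hv
        · exact H2 v hv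
        · exact Or.inr (hnewmem v hv).1
      have A3 : ∀ v ∈ V0, v ∈ seen ++ new :=
        fun v hv => List.mem_append.mpr (Or.inl (H3 v hv))
      have A4 : (seen ++ new).Nodup :=
        List.Nodup.append H4 hnd (fun x hx hx' => (hmem x hx').2 hx)
      have A7 : ∀ v ∈ seen ++ new, v ∉ V0 →
          v ∈ rest ++ new ∨ ∀ w ∈ graph.getD v [], w ∈ seen ++ new := by
        intro v hv hnv
        by_cases hvc : v = v0
        · subst hvc
          exact Or.inr (fun w hw => hall w hw)
        · rcases List.mem_append.mp hv with hv | hv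
          · rcases H7 v hv hnv with h | h
            · rw [hsplit] at h
              rcases List.mem_append.mp h with h | h
              · exact Or.inl (List.mem_append.mpr (Or.inl h))
              · simp only [List.mem_singleton] at h
                exact absurd h hvc
            · exact Or.inr (fun w hw => List.mem_append.mpr (Or.inl (h w hw)))
          · exact Or.inl (List.mem_append.mpr (Or.inr hv))
      have Afuel : (rest ++ new).length +
          (univ.filter (fun x => decide (x ∉ seen ++ new))).length ≤ fuel := by
        have hfl := pv_filt_len univ hU new seen hnd
          (fun x hx => ⟨(hnewmem x hx).2.2, (hnewmem x hx).2.1⟩)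
        have hlen : stack.length = rest.length + 1 := by
          rw [hsplit]; simp
        simp only [List.length_append] at Hf hfl ⊢
        omega
      have APerm : (seen ++ new).Perm (base ++ (proc0 ++ [v0]) ++ (rest ++ new)) := by
        have h0 : seen.Perm (base ++ proc0 ++ (rest ++ [v0])) := by
          rw [← hsplit]; exact HP
        have hsw : (rest ++ [v0]).Perm ([v0] ++ rest) := List.perm_append_comm
        have h1 : seen.Perm (base ++ proc0 ++ ([v0] ++ rest)) :=
          h0.trans (List.Perm.append_left _ hsw)
        have h2 : (seen ++ new).Perm ((base ++ proc0 ++ ([v0] ++ rest)) ++ new) :=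
          h1.append_right new
        have h3 : (base ++ proc0 ++ ([v0] ++ rest)) ++ new
            = base ++ (proc0 ++ [v0]) ++ (rest ++ new) := by
          simp [List.append_assoc]
        rw [h3] at h2
        exact h2
      have Hones : (if PySem.Int.mod (deg.getD v0 0) 2 = PySem.Int.mod v0 2
            then ones + 1 else ones) = ((proc0 ++ [v0]).countP (pvQ deg) : Int) := by
        rw [List.countP_append, Ho]
        by_cases h : PySem.Int.mod (deg.getD v0 0) 2 = PySem.Int.mod v0 2
        · rw [if_pos h]
          have hq : pvQ deg v0 = true := decide_eq_true h
          have h1 : List.countP (pvQ deg) [v0] = 1 := by simp [hq]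
          rw [h1]; push_cast; ring
        · rw [if_neg h]
          have hq : pvQ deg v0 = false := decide_eq_false h
          have h1 : List.countP (pvQ deg) [v0] = 0 := by simp [hq]
          rw [h1]; push_cast; ring
      have Hsize : size + 1 = ((proc0 ++ [v0]).length : Int) := by
        rw [List.length_append, Hs]; simp
      obtain ⟨C1, C2, C3, C4, C5⟩ := ih (seen ++ new) (rest ++ new) base (proc0 ++ [v0])
        _ _ A1 A2 A3 A4 A7 Afuel APerm Hones Hsize
      exact ⟨fun v hv => C1 v (List.mem_append.mpr (Or.inl hv)), C2, C3, C4, C5⟩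

lemma pv_bfs_run (graph : PySem.Dict Int (List Int)) (univ V0 : List Int) (s : Int) (fuel : Nat)
    (hU : univ.Nodup) (hadj : ∀ u w, w ∈ graph.getD u [] → w ∈ univ)
    (hV0 : V0.Nodup) (hs : s ∉ V0) (hfuel : univ.length + 1 ≤ fuel) :
    (bfsLoopA graph fuel (V0 ++ [s]) [s] []).1.Nodup ∧
    (bfsLoopA graph fuel (V0 ++ [s]) [s] []).1.Perm (V0 ++ (bfsLoopA graph fuel (V0 ++ [s]) [s] []).2) ∧
    (∀ v, v ∈ (bfsLoopA graph fuel (V0 ++ [s]) [s] []).1 ↔ v ∈ V0 ∨ pvReach graph V0 s v) := by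
  have hsv : s ∈ V0 ++ [s] := by simp
  obtain ⟨C1, C2, C3, C4, C5⟩ := pv_bfs_spec graph V0 univ s hU hadj fuel (V0 ++ [s]) [s] [] V0
    (by intro q hq; simp only [List.mem_singleton] at hq; subst hq
        exact ⟨pvReach.base hs, hsv⟩)
    (by intro v hv
        rcases List.mem_append.mp hv with hv | hv
        · exact Or.inl hv
        · simp only [List.mem_singleton] at hv; subst hv; exact Or.inr (pvReach.base hs))
    (fun v hv => List.mem_append.mpr (Or.inl hv))
    (by exact List.Nodup.append hV0 (List.nodup_cons.mpr ⟨by simp, List.nodup_nil⟩)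
          (by intro x hx hx'; simp only [List.mem_singleton] at hx'; subst hx'; exact hs hx))
    (by intro v hv hnv
        rcases List.mem_append.mp hv with hv | hv
        · exact absurd hv hnv
        · exact Or.inl hv)
    (by have := List.length_filter_le (fun x => decide (x ∉ V0 ++ [s])) univ
        simp only [List.length_singleton]
        omega)
    (by simp)
  refine ⟨C4, by simpa using C5, ?_⟩
  intro v
  constructor
  · exact C2 v
  · intro hv
    rcases hv with hv | hv
    · exact C1 v (List.mem_append.mpr (Or.inl hv))
    · induction hv with
      | base _ => exact C1 s hsv
      | step hr hw hnot ih2 =>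
        exact C3 _ ih2 (pvReach_not_mem hr) _ hw

lemma pv_dfs_run (graph : PySem.Dict Int (List Int)) (deg : PySem.Dict Int Int)
    (univ V0 : List Int) (s : Int) (fuel : Nat)
    (hU : univ.Nodup) (hadj : ∀ u w, w ∈ graph.getD u [] → w ∈ univ)
    (hV0 : V0.Nodup) (hs : s ∉ V0) (hfuel : univ.length + 1 ≤ fuel) :
    (dfsLoopB graph deg fuel (V0 ++ [s]) [s] 0 0).1.Nodup ∧
    (∀ v, v ∈ (dfsLoopB graph deg fuel (V0 ++ [s]) [s] 0 0).1 ↔ v ∈ V0 ∨ pvReach graph V0 s v) ∧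
    ∃ proc : List Int,
      (dfsLoopB graph deg fuel (V0 ++ [s]) [s] 0 0).1.Perm (V0 ++ proc) ∧
      (dfsLoopB graph deg fuel (V0 ++ [s]) [s] 0 0).2.1 = (proc.countP (pvQ deg) : Int) ∧
      (dfsLoopB graph deg fuel (V0 ++ [s]) [s] 0 0).2.2 = (proc.length : Int) := by
  have hsv : s ∈ V0 ++ [s] := by simp
  obtain ⟨C1, C2, C3, C4, C5⟩ := pv_dfs_spec graph deg V0 univ s hU hadj fuel (V0 ++ [s]) [s] V0 [] 0 0
    (by intro q hq; simp only [List.mem_singleton] at hq; subst hq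
        exact ⟨pvReach.base hs, hsv⟩)
    (by intro v hv
        rcases List.mem_append.mp hv with hv | hv
        · exact Or.inl hv
        · simp only [List.mem_singleton] at hv; subst hv; exact Or.inr (pvReach.base hs))
    (fun v hv => List.mem_append.mpr (Or.inl hv))
    (by exact List.Nodup.append hV0 (List.nodup_cons.mpr ⟨by simp, List.nodup_nil⟩)
          (by intro x hx hx'; simp only [List.mem_singleton] at hx'; subst hx'; exact hs hx))
    (by intro v hv hnv
        rcases List.mem_append.mp hv with hv | hv
        · exact absurd hv hnv
        · exact Or.inl hv)
    (by have := List.length_filter_le (fun x => decide (x ∉ V0 ++ [s])) univ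
        simp only [List.length_singleton]
        omega)
    (by simp)
    (by simp)
    (by simp)
  refine ⟨C4, ?_, C5⟩
  intro v
  constructor
  · exact C2 v
  · intro hv
    rcases hv with hv | hv
    · exact C1 v (List.mem_append.mpr (Or.inl hv))
    · induction hv with
      | base _ => exact C1 s hsv
      | step hr hw hnot ih2 =>
        exact C3 _ ih2 (pvReach_not_mem hr) _ hw

lemma pv_outer (graph : PySem.Dict Int (List Int)) (deg : PySem.Dict Int Int)
    (univ : List Int) (fuel : Nat)
    (hU : univ.Nodup) (hadj : ∀ u w, w ∈ graph.getD u [] → w ∈ univ)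
    (hfuel : univ.length + 1 ≤ fuel)
    (hdeg : ∀ v, deg.getD v 0 = ((graph.getD v []).length : Int)) :
    ∀ (rest : List Int) (vA sB : List Int) (comps : List (List Int)) (oe rev : Int),
    vA.Nodup → sB.Nodup → (∀ x, x ∈ vA ↔ x ∈ sB) →
    oe = ((comps.map (pvOE graph)).sum) → rev = ((comps.map (pvREV graph)).sum) →
    ((rest.foldl (fun (st : PySem.Set Int × Int × Int) s =>
        if s ∈ st.1 then st
        else
          let r := dfsLoopB graph deg fuel (PySem.Set.add st.1 s) [s] 0 0
          (r.1, st.2.1 + (if r.2.1 = 1 then (1:Int) else 0),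
                st.2.2 + (if r.2.2 - r.2.1 = 1 then (1:Int) else 0))) (sB, oe, rev)).2.1
      = (((rest.foldl (fun (st : PySem.Set Int × List (List Int)) node =>
          if node ∈ st.1 then st
          else
            let r := bfsLoopA graph fuel (PySem.Set.add st.1 node) [node] []
            (r.1, st.2 ++ [r.2])) (vA, comps)).2.map (pvOE graph)).sum) ∧
     (rest.foldl (fun (st : PySem.Set Int × Int × Int) s =>
        if s ∈ st.1 then st
        else
          let r := dfsLoopB graph deg fuel (PySem.Set.add st.1 s) [s] 0 0
          (r.1, st.2.1 + (if r.2.1 = 1 then (1:Int) else 0),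
                st.2.2 + (if r.2.2 - r.2.1 = 1 then (1:Int) else 0))) (sB, oe, rev)).2.2
      = (((rest.foldl (fun (st : PySem.Set Int × List (List Int)) node =>
          if node ∈ st.1 then st
          else
            let r := bfsLoopA graph fuel (PySem.Set.add st.1 node) [node] []
            (r.1, st.2 ++ [r.2])) (vA, comps)).2.map (pvREV graph)).sum)) := by
  intro rest
  induction rest with
  | nil =>
    intro vA sB comps oe rev _ _ _ hoe hrev
    exact ⟨hoe, hrev⟩
  | cons s t ih =>
    intro vA sB comps oe rev hA hB hmem hoe hrev
    simp only [List.foldl_cons]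
    by_cases hs : s ∈ vA
    · have hs' : s ∈ sB := (hmem s).mp hs
      rw [if_pos hs, if_pos hs']
      exact ih vA sB comps oe rev hA hB hmem hoe hrev
    · have hs' : s ∉ sB := fun h => hs ((hmem s).mpr h)
      rw [if_neg hs, if_neg hs']
      rw [show PySem.Set.add vA s = vA ++ [s] from by simp [PySem.Set.add, hs]]
      rw [show PySem.Set.add sB s = sB ++ [s] from by simp [PySem.Set.add, hs']]
      obtain ⟨NdA, PermA, IffA⟩ := pv_bfs_run graph univ vA s fuel hU hadj hA hs hfuel
      obtain ⟨NdB, IffB, proc, PermB, Hcnt, Hlen⟩ :=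
        pv_dfs_run graph deg univ sB s fuel hU hadj hB hs' hfuel
      have hVperm : vA.Perm sB := (List.perm_ext_iff_of_nodup hA hB).mpr hmem
      have hSetEq : ∀ v, v ∈ (bfsLoopA graph fuel (vA ++ [s]) [s] []).1
          ↔ v ∈ (dfsLoopB graph deg fuel (sB ++ [s]) [s] 0 0).1 := by
        intro v
        rw [IffA v, IffB v]
        constructor
        · rintro (h | h)
          · exact Or.inl ((hmem v).mp h)
          · exact Or.inr (pvReach_congr hmem h)
        · rintro (h | h)
          · exact Or.inl ((hmem v).mpr h)
          · exact Or.inr (pvReach_congr (fun x => (hmem x).symm) h)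
      have PermAB : (bfsLoopA graph fuel (vA ++ [s]) [s] []).1.Perm
          (dfsLoopB graph deg fuel (sB ++ [s]) [s] 0 0).1 :=
        (List.perm_ext_iff_of_nodup NdA NdB).mpr hSetEq
      have hcompproc : (bfsLoopA graph fuel (vA ++ [s]) [s] []).2.Perm proc := by
        have h1 : (vA ++ (bfsLoopA graph fuel (vA ++ [s]) [s] []).2).Perm (vA ++ proc) :=
          (PermA.symm.trans (PermAB.trans PermB)).trans ((hVperm.symm).append_right proc)
        exact (List.perm_append_left_iff vA).mp h1
      have hQP : pvQ deg = pvP graph := by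
        funext v
        simp only [pvQ, pvP, hdeg v]
      have hcnt2 : (dfsLoopB graph deg fuel (sB ++ [s]) [s] 0 0).2.1
          = ((((bfsLoopA graph fuel (vA ++ [s]) [s] []).2).countP (pvP graph) : Nat) : Int) := by
        rw [Hcnt, hQP]
        exact_mod_cast congrArg Nat.cast (hcompproc.countP_eq (pvP graph)).symm
      have hlen2 : (dfsLoopB graph deg fuel (sB ++ [s]) [s] 0 0).2.2
          = (((bfsLoopA graph fuel (vA ++ [s]) [s] []).2).length : Int) := by
        rw [Hlen]
        exact_mod_cast congrArg Nat.cast hcompproc.length_eq.symm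
      have hoeterm : (if (dfsLoopB graph deg fuel (sB ++ [s]) [s] 0 0).2.1 = 1 then (1:Int) else 0)
          = pvOE graph ((bfsLoopA graph fuel (vA ++ [s]) [s] []).2) := by
        rw [hcnt2, pvOE]
        by_cases h : ((bfsLoopA graph fuel (vA ++ [s]) [s] []).2).countP (pvP graph) = 1
        · rw [if_pos h, if_pos (by exact_mod_cast h)]
        · rw [if_neg h, if_neg (by exact_mod_cast h)]
      have hrevterm : (if (dfsLoopB graph deg fuel (sB ++ [s]) [s] 0 0).2.2
            - (dfsLoopB graph deg fuel (sB ++ [s]) [s] 0 0).2.1 = 1 then (1:Int) else 0)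
          = pvREV graph ((bfsLoopA graph fuel (vA ++ [s]) [s] []).2) := by
        rw [hcnt2, hlen2, pvREV]
        have hsplitc : ((bfsLoopA graph fuel (vA ++ [s]) [s] []).2).length
            = ((bfsLoopA graph fuel (vA ++ [s]) [s] []).2).countP (pvP graph)
              + ((bfsLoopA graph fuel (vA ++ [s]) [s] []).2).countP (fun v => !pvP graph v) := by
          rw [List.countP_eq_length_filter, List.countP_eq_length_filter]
          exact List.length_eq_length_filter_add (pvP graph)
        by_cases h : ((bfsLoopA graph fuel (vA ++ [s]) [s] []).2).countP (fun v => !pvP graph v) = 1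
        · rw [if_pos (by omega), if_pos h]
        · rw [if_neg (by omega), if_neg h]
      rw [hoeterm, hrevterm]
      exact ih _ _ (comps ++ [(bfsLoopA graph fuel (vA ++ [s]) [s] []).2]) _ _
        NdA NdB hSetEq
        (by simp [hoe, List.map_append, List.sum_append])
        (by simp [hrev, List.map_append, List.sum_append])

-- ===== VERDICT (by name: the statement is the Claim_ definition above) =====
theorem solution_spec : Claim_equal_solution := by
  intro nodes edges _ hpre
  show solution nodes edges = solution_alt nodes edges
  simp only [solution, solution_alt]
  rw [pv_adj_proj edges (nodes.foldl (fun (g : PySem.Dict Int (List Int)) v => g.insert v []) PySem.Dict.empty)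
    (nodes.foldl (fun (d : PySem.Dict Int Int) v => d.insert v 0) PySem.Dict.empty)]
  have hempty_adj : ∀ v : Int, (PySem.Dict.empty : PySem.Dict Int (List Int)).getD v [] = [] :=
    fun v => rfl
  have hempty_deg : ∀ v : Int, (PySem.Dict.empty : PySem.Dict Int Int).getD v 0 = 0 :=
    fun v => rfl
  have hinit : ∀ v : Int,
      (nodes.foldl (fun (d : PySem.Dict Int Int) v => d.insert v 0) PySem.Dict.empty).getD v 0
      = (((nodes.foldl (fun (g : PySem.Dict Int (List Int)) v => g.insert v []) PySem.Dict.empty).getD v []).length : Int) := by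
    intro v
    rw [pv_init_deg nodes PySem.Dict.empty hempty_deg v,
      pv_init_adj nodes PySem.Dict.empty hempty_adj v]
    rfl
  have hdeg := pv_deg_inv edges
    (nodes.foldl (fun (g : PySem.Dict Int (List Int)) v => g.insert v []) PySem.Dict.empty)
    (nodes.foldl (fun (d : PySem.Dict Int Int) v => d.insert v 0) PySem.Dict.empty) hinit
  rw [pv_adj_proj edges (nodes.foldl (fun (g : PySem.Dict Int (List Int)) v => g.insert v []) PySem.Dict.empty)
    (nodes.foldl (fun (d : PySem.Dict Int Int) v => d.insert v 0) PySem.Dict.empty)] at hdeg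
  have hg0mem : ∀ u w : Int,
      w ∈ (nodes.foldl (fun (g : PySem.Dict Int (List Int)) v => g.insert v []) PySem.Dict.empty).getD u [] → w ∈ nodes := by
    intro u w hw
    rw [pv_init_adj nodes PySem.Dict.empty hempty_adj u] at hw
    simp at hw
  have hadjn := pv_adj_mem nodes edges
    (nodes.foldl (fun (g : PySem.Dict Int (List Int)) v => g.insert v []) PySem.Dict.empty) hpre hg0mem
  have hadj : ∀ u w : Int, w ∈ (edges.foldl (fun g e =>
      let a := (PySem.List.pyGet? e 0).getD 0
      let b := (PySem.List.pyGet? e 1).getD 0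
      let g := g.modify a [] (fun l => l ++ [b])
      g.modify b [] (fun l => l ++ [a]))
      (nodes.foldl (fun (g : PySem.Dict Int (List Int)) v => g.insert v []) PySem.Dict.empty)).getD u []
      → w ∈ nodes.dedup :=
    fun u w hw => List.mem_dedup.mpr (hadjn u w hw)
  obtain ⟨hc1, hc2⟩ := pv_outer
    (edges.foldl (fun g e =>
      let a := (PySem.List.pyGet? e 0).getD 0
      let b := (PySem.List.pyGet? e 1).getD 0
      let g := g.modify a [] (fun l => l ++ [b])
      g.modify b [] (fun l => l ++ [a]))
      (nodes.foldl (fun (g : PySem.Dict Int (List Int)) v => g.insert v []) PySem.Dict.empty))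
    ((edges.foldl (fun (ad : PySem.Dict Int (List Int) × PySem.Dict Int Int) e =>
      let a := (PySem.List.pyGet? e 0).getD 0
      let b := (PySem.List.pyGet? e 1).getD 0
      ((ad.1.modify a [] (fun l => l ++ [b])).modify b [] (fun l => l ++ [a]),
       (ad.2.modify a 0 (fun n => n + 1)).modify b 0 (fun n => n + 1)))
      (nodes.foldl (fun (g : PySem.Dict Int (List Int)) v => g.insert v []) PySem.Dict.empty,
       nodes.foldl (fun (d : PySem.Dict Int Int) v => d.insert v 0) PySem.Dict.empty)).2)
    nodes.dedup (nodes.length + 1) (List.nodup_dedup nodes) hadj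
    (by have := List.Sublist.length_le (List.dedup_sublist nodes); omega)
    hdeg nodes PySem.Set.empty PySem.Set.empty [] 0 0
    List.nodup_nil List.nodup_nil (fun x => Iff.rfl) (by simp) (by simp)
  rw [pv_contrib, pv_foldAns, hc1, hc2]
  simp
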